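-- pv_equiv track=rewrite | github.com/2021-Algorithm-CNUstudy/solution | 원송희/kakao_가사검색.py | makeWildCard2
-- ===== SOURCE A (Python) =====
-- def makeWildCard2(arr):
--     toReturn=[]
--     for i in range(len(arr)):
--         for j in range(len(arr[i])-1, -1, -1):
--             s_list=list(arr[i])
--             for k in range(len(s_list)-1, j-1, -1):
--                 s_list[k]="?"
--             toReturn.append("".join(s_list))
--     return toReturn
-- ===== SOURCE B (Python) =====
-- def makeWildCard2(arr):
--     return [w[:len(w) - n] + "?" * n for w in arr for n in range(1, len(w) + 1)]
-- ===== Notes on version B (the rewrite author's own statement) =====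
-- stated objective: simpler
-- what changed: Replaces the three nested index loops over a mutable character list with a single flat comprehension that forms each variant directly as the prefix slice w[:len(w)-n] plus the string '?'*n.
import Mathlib
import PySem

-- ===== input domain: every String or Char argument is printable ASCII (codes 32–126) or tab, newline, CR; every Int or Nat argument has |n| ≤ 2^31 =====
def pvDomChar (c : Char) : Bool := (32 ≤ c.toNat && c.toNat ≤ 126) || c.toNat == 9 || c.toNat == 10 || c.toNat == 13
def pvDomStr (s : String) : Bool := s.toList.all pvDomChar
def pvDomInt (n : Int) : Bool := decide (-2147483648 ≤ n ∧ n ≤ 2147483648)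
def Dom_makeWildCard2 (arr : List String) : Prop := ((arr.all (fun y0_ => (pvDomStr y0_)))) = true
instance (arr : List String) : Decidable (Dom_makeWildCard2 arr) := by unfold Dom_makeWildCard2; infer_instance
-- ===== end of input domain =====

-- B replaces A's three nested index loops over a mutable char list by one flat
-- comprehension building each variant as prefix-slice ++ '?'*n (objective: simpler).

-- ===== PORT A =====
-- body of A's outer iteration (the 'for j' / 'for k' loops for one word w, appending to toReturn)
def pvStepA (toReturn : List String) (w : String) : List String :=
  (PySem.List.pyRange ((w.toList.length : Int) - 1) (-1) (-1)).foldl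
    (fun toReturn j =>
      let sList := w.toList
      let sList :=
        (PySem.List.pyRange ((sList.length : Int) - 1) (j - 1) (-1)).foldl
          (fun s k => s.set k.toNat '?') sList   -- s_list[k] = "?" (k is in range by the loop bounds)
      toReturn ++ [String.ofList sList])
    toReturn

-- literal transliteration: for i in range(len(arr)): … arr[i] …
def makeWildCard2 (arr : List String) : List String :=
  (PySem.List.pyRange 0 (PySem.List.len arr) 1).foldl
    (fun toReturn i => pvStepA toReturn (PySem.List.pyGetD arr i "")) []

-- ===== PORT B =====
def makeWildCard2_alt (arr : List String) : List String :=
  arr.flatMap (fun w =>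
    (PySem.List.pyRange 1 ((w.toList.length : Int) + 1) 1).map (fun n =>
      String.ofList (PySem.List.slice w.toList none (some ((w.toList.length : Int) - n)) ++
                 PySem.List.pyRepeat ['?'] n)))

-- ===== PRECONDITION & SPEC =====
def Spec_makeWildCard2 (arr : List String) (out : List String) : Prop := out = makeWildCard2_alt arr
instance (arr : List String) (out : List String) : Decidable (Spec_makeWildCard2 arr out) := by unfold Spec_makeWildCard2; infer_instance

-- ===== CLAIM (what is proved, stated in full; the proofs are below) =====
def Claim_equal_makeWildCard2 : Prop := ∀ (arr : List String), Dom_makeWildCard2 arr → Spec_makeWildCard2 arr (makeWildCard2 arr)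

-- ===== LEMMAS AND PROOFS =====

-- A's innermost loop: overwriting positions a, a-1, …, j with '?' yields take j ++ '?'^(a+1-j) ++ drop (a+1)
theorem pvSetLoop : ∀ (n : Nat) (cs : List Char) (a j : Nat), a + 1 - j = n → j ≤ a + 1 → a < cs.length →
    (PySem.List.pyRange (a : Int) ((j : Int) - 1) (-1)).foldl (fun s k => s.set k.toNat '?') cs
      = cs.take j ++ List.replicate (a + 1 - j) '?' ++ cs.drop (a + 1) := by
  intro n
  induction n with
  | zero =>
    intro cs a j hn hj ha
    have hja : j = a + 1 := by omega
    subst hja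
    rw [PySem.List.pyRange_neg_one_eq_nil (by omega)]
    simp
  | succ m ih =>
    intro cs a j hn hj ha
    have hja : j ≤ a := by omega
    rw [PySem.List.pyRange_neg_one_cons (by omega)]
    simp only [List.foldl_cons, Int.toNat_natCast]
    have hset : cs.set a '?' = cs.take a ++ '?' :: cs.drop (a + 1) := by
      rw [List.set_eq_take_append_cons_drop, if_pos ha]
    by_cases h0 : a = 0
    · subst h0
      have hj0 : j = 0 := by omega
      subst hj0
      rw [PySem.List.pyRange_neg_one_eq_nil (by norm_num)]
      simp only [List.foldl_nil, List.take_zero, List.nil_append]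
      rw [hset]
      simp
    · have ha1 : (a : Int) - 1 = ((a - 1 : Nat) : Int) := by omega
      have hrec := ih (cs.set a '?') (a - 1) j (by omega) (by omega)
        (by rw [List.length_set]; omega)
      rw [ha1, hrec]
      have hlen : (cs.take a).length = a := by
        rw [List.length_take]; omega
      have h1 : (cs.set a '?').take j = cs.take j := by
        rw [hset, List.take_append_of_le_length (by omega), List.take_take,
            min_eq_left hja]
      have h2 : (cs.set a '?').drop (a - 1 + 1) = '?' :: cs.drop (a + 1) := by
        have hae : a - 1 + 1 = a := by omega
        rw [hae, hset, List.drop_append_of_le_length (by omega),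
            List.drop_eq_nil_of_le (by simp), List.nil_append]
      rw [h1, h2]
      have h3 : a + 1 - j = (a - 1 + 1 - j) + 1 := by omega
      rw [h3, List.replicate_succ']
      simp
-- A's per-word double loop equals B's per-word map
theorem pvPerWord (acc : List String) (w : String) :
    pvStepA acc w
      = acc ++ (PySem.List.pyRange 1 ((w.toList.length : Int) + 1) 1).map (fun n =>
          String.ofList (PySem.List.slice w.toList none (some ((w.toList.length : Int) - n)) ++
                     PySem.List.pyRepeat ['?'] n)) := by
  unfold pvStepA
  set cs := w.toList with hcs
  set L := cs.length with hL
  rw [PySem.List.foldl_append_singleton_eq_map, PySem.List.pyRange_neg_one,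
      PySem.List.pyRange_one]
  have hcnt : ((L : Int) - 1 - (-1)).toNat = L := by omega
  have hcnt2 : ((L : Int) + 1 - 1).toNat = L := by omega
  rw [hcnt, hcnt2, List.map_map, List.map_map]
  congr 1
  apply List.map_congr_left
  intro k hk
  have hkL : k < L := List.mem_range.mp hk
  simp only [Function.comp]
  have hj : (L : Int) - 1 - k = ((L - 1 - k : Nat) : Int) := by omega
  have hL1 : (L : Int) - 1 = ((L - 1 : Nat) : Int) := by omega
  rw [hj, hL1, pvSetLoop (L - 1 + 1 - (L - 1 - k)) cs (L - 1) (L - 1 - k) rfl (by omega) (by omega)]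
  have hb : (L : Int) - (1 + k) = ((L - 1 - k : Nat) : Int) := by omega
  rw [hb, PySem.List.slice_to_natCast, PySem.List.pyRepeat_singleton]
  have hdrop : cs.drop (L - 1 + 1) = [] := List.drop_eq_nil_of_le (by omega)
  have hrep : L - 1 + 1 - (L - 1 - k) = ((1 : Int) + k).toNat := by omega
  rw [hdrop, List.append_nil, hrep]

-- ===== VERDICT (by name: the statement is the Claim_ definition above) =====
theorem makeWildCard2_spec : Claim_equal_makeWildCard2 := by
  intro arr _
  unfold Spec_makeWildCard2 makeWildCard2 makeWildCard2_alt
  rw [PySem.List.foldl_pyRange_zero_pyGetD arr "" pvStepA []]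
  rw [PySem.List.foldl_congr_mem arr pvStepA
        (fun acc w => acc ++ (PySem.List.pyRange 1 ((w.toList.length : Int) + 1) 1).map (fun n =>
          String.ofList (PySem.List.slice w.toList none (some ((w.toList.length : Int) - n)) ++
                         PySem.List.pyRepeat ['?'] n))) []
        (fun acc w _ => pvPerWord acc w)]
  rw [PySem.List.foldl_append_eq_flatMap]
  exact List.nil_append _
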